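-- pv_equiv track=rewrite | github.com/github81/algoexpert.io | test/test.py | lowerFirst
-- ===== SOURCE A (Python) =====
-- def lowerFirst(s):
--
-- 	l = []
-- 	insertAt = 0
-- 	for c in s:
-- 		if c.islower():
-- 			l.insert(insertAt,c)
-- 			insertAt+=1
-- 		else:
-- 			l.append(c)
--
-- 	return ''.join(l)
-- ===== SOURCE B (Python) =====
-- def lowerFirst(s):
-- 	return ''.join(sorted(s, key=lambda c: not c.islower()))
-- ===== Notes on version B (the rewrite author's own statement) =====
-- stated objective: idiomatic
-- what changed: Replaces A's insertion-pointer loop (list.insert at a moving index for lowercase chars, append for others) with a single stable sort keyed on whether the char is non-lowercase, then a join.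
import Mathlib
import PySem

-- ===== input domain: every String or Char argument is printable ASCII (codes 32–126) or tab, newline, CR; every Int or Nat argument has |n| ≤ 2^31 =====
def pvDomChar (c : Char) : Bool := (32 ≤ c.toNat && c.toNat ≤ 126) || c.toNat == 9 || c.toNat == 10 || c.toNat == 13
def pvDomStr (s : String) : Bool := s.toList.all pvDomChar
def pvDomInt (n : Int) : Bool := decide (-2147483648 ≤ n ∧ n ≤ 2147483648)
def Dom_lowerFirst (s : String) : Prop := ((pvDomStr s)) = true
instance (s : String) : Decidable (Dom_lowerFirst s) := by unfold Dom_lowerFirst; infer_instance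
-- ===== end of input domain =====

-- B replaces A's insertion-pointer pass with one stable sort on a boolean key (idiomatic; return value only).

-- ===== PORT A =====
def lowerFirst (s : String) : String :=
  let st := s.toList.foldl
    (fun (st : List Char × Int) c =>
      if PySem.Chars.islower c then
        (PySem.List.insert st.1 st.2 c, st.2 + 1)
      else
        (st.1 ++ [c], st.2))
    ([], 0)
  String.ofList st.1

-- ===== PORT B =====
def lowerFirst_alt (s : String) : String :=
  String.ofList (PySem.List.sorted s.toList (fun c => !PySem.Chars.islower c))

-- ===== PRECONDITION & SPEC =====
def Spec_lowerFirst (s : String) (out : String) : Prop := out = lowerFirst_alt s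
instance (s : String) (out : String) : Decidable (Spec_lowerFirst s out) := by unfold Spec_lowerFirst; infer_instance

-- ===== CLAIM (what is proved, stated in full; the proofs are below) =====
def Claim_equal_lowerFirst : Prop := ∀ (s : String), Dom_lowerFirst s → Spec_lowerFirst s (lowerFirst s)

-- ===== LEMMAS AND PROOFS =====

-- insertBy places x right between a block it never goes before and a block it goes before (or at the end).
theorem pv_insertBy_mid (before : Char → Char → Bool) (x : Char) (L H : List Char)
    (hL : ∀ a ∈ L, before x a = false)
    (hH : H = [] ∨ ∃ h t, H = h :: t ∧ before x h = true) :
    PySem.List.insertBy before x (L ++ H) = L ++ x :: H := by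
  induction L with
  | nil =>
    rcases hH with rfl | ⟨h, t, rfl, hh⟩
    · simpa using PySem.List.insertBy_of_forall_not_before before x [] (by simp)
    · simp [PySem.List.insertBy, hh]
  | cons a L ih =>
    have ha : before x a = false := hL a (by simp)
    simp only [List.cons_append, PySem.List.insertBy, ha]
    simp [ih (fun b hb => hL b (by simp [hb]))]

-- invariant of A's loop: lows before the pointer, others after, pointer = number of lows
theorem pv_loopA (cs L H : List Char)
    (hL : ∀ a ∈ L, PySem.Chars.islower a = true)
    (hH : ∀ a ∈ H, PySem.Chars.islower a = false) :
    cs.foldl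
      (fun (st : List Char × Int) c =>
        if PySem.Chars.islower c then
          (PySem.List.insert st.1 st.2 c, st.2 + 1)
        else
          (st.1 ++ [c], st.2))
      (L ++ H, (L.length : Int))
    = ((L ++ cs.filter (fun c => PySem.Chars.islower c))
        ++ (H ++ cs.filter (fun c => !PySem.Chars.islower c)),
       ((L ++ cs.filter (fun c => PySem.Chars.islower c)).length : Int)) := by
  induction cs generalizing L H with
  | nil => simp
  | cons c cs ih =>
    by_cases hc : PySem.Chars.islower c = true
    · have hins : PySem.List.insert (L ++ H) (L.length : Int) c = L ++ c :: H := by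
        rw [PySem.List.insert_natCast (L ++ H) L.length c (by simp)]
        simp
      have h1 : ∀ a ∈ L ++ [c], PySem.Chars.islower a = true := by
        intro a ha; rcases List.mem_append.mp ha with h | h
        · exact hL a h
        · simp only [List.mem_singleton] at h; subst h; exact hc
      have := ih (L ++ [c]) H h1 hH
      simp only [List.foldl_cons, hc, hins, if_true]
      rw [show (L ++ c :: H) = (L ++ [c]) ++ H by simp,
          show ((L.length : Int) + 1) = (((L ++ [c]).length : Nat) : Int) by simp]
      rw [this]
      simp [hc]
    · have hc' : PySem.Chars.islower c = false := by simpa using hc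
      have h2 : ∀ a ∈ H ++ [c], PySem.Chars.islower a = false := by
        intro a ha; rcases List.mem_append.mp ha with h | h
        · exact hH a h
        · simp only [List.mem_singleton] at h; subst h; exact hc'
      have := ih L (H ++ [c]) hL h2
      simp only [List.foldl_cons, hc', Bool.false_eq_true, if_false]
      rw [show ((L ++ H) ++ [c]) = L ++ (H ++ [c]) by simp]
      rw [this]
      simp [hc']

-- invariant of B's stable insertion sort with the boolean key
theorem pv_loopB (cs L H : List Char)
    (hL : ∀ a ∈ L, PySem.Chars.islower a = true)
    (hH : ∀ a ∈ H, PySem.Chars.islower a = false) :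
    cs.foldl
      (fun acc x =>
        PySem.List.insertBy
          (fun a b => decide ((!PySem.Chars.islower a) < (!PySem.Chars.islower b))) x acc)
      (L ++ H)
    = (L ++ cs.filter (fun c => PySem.Chars.islower c))
        ++ (H ++ cs.filter (fun c => !PySem.Chars.islower c)) := by
  induction cs generalizing L H with
  | nil => simp
  | cons c cs ih =>
    by_cases hc : PySem.Chars.islower c = true
    · have hmid : PySem.List.insertBy
          (fun a b => decide ((!PySem.Chars.islower a) < (!PySem.Chars.islower b))) c (L ++ H)
          = L ++ c :: H := by
        apply pv_insertBy_mid
        · intro a ha; simp [hc, hL a ha]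
        · cases H with
          | nil => exact Or.inl rfl
          | cons h t => exact Or.inr ⟨h, t, rfl, by simp [hc, hH h (by simp)]⟩
      have h1 : ∀ a ∈ L ++ [c], PySem.Chars.islower a = true := by
        intro a ha; rcases List.mem_append.mp ha with h | h
        · exact hL a h
        · simp only [List.mem_singleton] at h; subst h; exact hc
      have := ih (L ++ [c]) H h1 hH
      simp only [List.foldl_cons, hmid]
      rw [show (L ++ c :: H) = (L ++ [c]) ++ H by simp, this]
      simp [hc]
    · have hc' : PySem.Chars.islower c = false := by simpa using hc
      have hend : PySem.List.insertBy
          (fun a b => decide ((!PySem.Chars.islower a) < (!PySem.Chars.islower b))) c (L ++ H)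
          = L ++ (H ++ [c]) := by
        rw [PySem.List.insertBy_of_forall_not_before _ c (L ++ H)
          (by intro a ha; simp [hc'])]
        simp
      have h2 : ∀ a ∈ H ++ [c], PySem.Chars.islower a = false := by
        intro a ha; rcases List.mem_append.mp ha with h | h
        · exact hH a h
        · simp only [List.mem_singleton] at h; subst h; exact hc'
      have := ih L (H ++ [c]) hL h2
      simp only [List.foldl_cons, hend, this]
      simp [hc']

-- ===== VERDICT (by name: the statement is the Claim_ definition above) =====
theorem lowerFirst_spec : Claim_equal_lowerFirst := by
  intro s _
  unfold Spec_lowerFirst lowerFirst lowerFirst_alt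
  rw [PySem.List.sorted_eq_foldl_insertBy]
  have hA := pv_loopA s.toList [] [] (by simp) (by simp)
  have hB := pv_loopB s.toList [] [] (by simp) (by simp)
  simp only [List.nil_append, List.length_nil, Nat.cast_zero] at hA hB
  rw [hA, hB]
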